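-- pv_equiv track=rewrite | github.com/kaifaust/octohedra | Octoflake/analysis/sandbox/TrainSeats.py | heapSeatingGenerator
-- ===== SOURCE A (Python) =====
-- from heapq import heappush, heappop
--
-- def heapSeatingGenerator(n):
--     # (gap size (negative because heapq only does min-heaps), left end of gap, right end)
--
--     gaps = [(-n, -1, n)]
--     for _ in range(n):
--         # Get the biggest, left-most gap
--         m, l, r = heappop(gaps)
--
--         # Seat someone in the middle (rounded down if the gap is of an even size)
--         s = (r + l) // 2
--
--         # put the resulting gaps back into the heap.
--         heappush(gaps, (-(s - 1 - l), l, s))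
--         heappush(gaps, (-(r - 1 - s), s, r))
--         yield s
-- ===== SOURCE B (Python) =====
-- def heapSeatingGenerator(n):
--     # Enumerate the whole gap tree recursively, then emit seats in heap-key order
--     # (key = (-size, left, right)); one global sort replaces the incremental heap.
--     def collect(l, r):
--         size = r - 1 - l
--         if size <= 0:
--             return []
--         s = (r + l) // 2
--         return [(-size, l, r)] + collect(l, s) + collect(s, r)
--
--     for _, l, r in sorted(collect(-1, n)):
--         yield (r + l) // 2
-- ===== Notes on version B (the rewrite author's own statement) =====
-- stated objective: faster
-- what changed: Replaces the incremental heappush/heappop loop by one recursive enumeration of the whole gap tree followed by a single global sort of the heap keys (-size, l, r); correctness rests on every parent gap having a strictly smaller key than its descendants, so the heap's pop order is exactly sorted key order.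
import Mathlib
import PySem

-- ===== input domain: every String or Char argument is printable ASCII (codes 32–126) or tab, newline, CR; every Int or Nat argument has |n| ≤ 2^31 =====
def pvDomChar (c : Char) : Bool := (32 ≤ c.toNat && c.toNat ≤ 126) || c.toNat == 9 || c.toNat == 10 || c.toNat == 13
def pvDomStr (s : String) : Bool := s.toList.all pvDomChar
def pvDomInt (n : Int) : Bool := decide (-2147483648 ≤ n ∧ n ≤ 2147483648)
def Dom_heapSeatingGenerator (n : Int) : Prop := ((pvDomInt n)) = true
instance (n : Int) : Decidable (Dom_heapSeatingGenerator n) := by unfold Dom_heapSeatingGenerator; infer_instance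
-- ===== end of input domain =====

-- B replaces A's incremental heap loop by one recursive enumeration of the whole gap
-- tree followed by a single global sort of the heap keys (objective: faster, constant factor).

-- ===== PORT A =====
-- Python lexicographic '<' on int-triples (the tuple comparison heapq performs on its keys).
def pvLt3 (a b : Int × Int × Int) : Bool :=
  decide (a.1 < b.1) || (decide (a.1 = b.1) &&
    (decide (a.2.1 < b.2.1) || (decide (a.2.1 = b.2.1) && decide (a.2.2 < b.2.2))))

-- heapq model: the heap is its list of entries; heappop returns the smallest entry
-- (first-minimal; in A's reachable states entries are distinct, so ties never occur)
-- and removes it; heappush adds an entry (internal heap layout is unobservable).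
def pvFindMin (g : List (Int × Int × Int)) : Option (Int × Int × Int) :=
  match g with
  | [] => none
  | x :: xs => some (xs.foldl (fun m y => if pvLt3 y m then y else m) x)

def pvRemoveFirst (k : Int × Int × Int) : List (Int × Int × Int) → List (Int × Int × Int)
  | [] => []
  | x :: xs => if x = k then xs else x :: pvRemoveFirst k xs

-- the 'for _ in range(n)' loop of A
def pvPopLoop : Nat → List (Int × Int × Int) → List Int
  | 0, _ => []
  | k+1, gaps =>
    match pvFindMin gaps with
    | none => []   -- heappop on an empty heap (unreachable: the heap always has ≥ 1 entry)
    | some g =>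
      let rest := pvRemoveFirst g gaps
      let s := PySem.Int.floordiv (g.2.2 + g.2.1) 2
      s :: pvPopLoop k ((-(s - 1 - g.2.1), g.2.1, s) :: (-(g.2.2 - 1 - s), s, g.2.2) :: rest)

def heapSeatingGenerator (n : Int) : List Int := pvPopLoop n.toNat [(-n, -1, n)]

-- ===== PORT B =====
-- Source B's collect(l, r); the Nat argument is a totality fuel only, never reached
-- with the fuel supplied at the call site.
def pvCollect : Nat → Int → Int → List (Int × Int × Int)
  | 0, _, _ => []
  | fuel+1, l, r =>
    if r - 1 - l ≤ 0 then []
    else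
      let s := PySem.Int.floordiv (r + l) 2
      (-(r - 1 - l), l, r) :: (pvCollect fuel l s ++ pvCollect fuel s r)

-- sorted(xs) on int-triples: PySem.List.sorted's own foldl/insertBy shape
-- (PySem.List.sorted_eq_foldl_insertBy) with Python's lexicographic tuple '<' written out.
def pvSortK (xs : List (Int × Int × Int)) : List (Int × Int × Int) :=
  xs.foldl (fun acc x => PySem.List.insertBy pvLt3 x acc) []

def heapSeatingGenerator_alt (n : Int) : List Int :=
  (pvSortK (pvCollect (n.toNat + 1) (-1) n)).map
    (fun g => PySem.Int.floordiv (g.2.2 + g.2.1) 2)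

-- ===== PRECONDITION & SPEC =====
def Spec_heapSeatingGenerator (n : Int) (out : List Int) : Prop := out = heapSeatingGenerator_alt n
instance (n : Int) (out : List Int) : Decidable (Spec_heapSeatingGenerator n out) := by unfold Spec_heapSeatingGenerator; infer_instance

-- ===== CLAIM (what is proved, stated in full; the proofs are below) =====
def Claim_equal_heapSeatingGenerator : Prop := ∀ (n : Int), Dom_heapSeatingGenerator n → Spec_heapSeatingGenerator n (heapSeatingGenerator n)

-- ===== LEMMAS AND PROOFS =====

-- proof-side vocabulary
def pvWfG (g : Int × Int × Int) : Prop := g.1 = -(g.2.2 - 1 - g.2.1)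
def pvSep (a b : Int × Int × Int) : Prop := a.2.2 ≤ b.2.1 ∨ b.2.2 ≤ a.2.1
def pvInv (G : List (Int × Int × Int)) : Prop := (∀ g ∈ G, pvWfG g) ∧ G.Pairwise pvSep
def pvNodes (l r : Int) : List (Int × Int × Int) := pvCollect ((r - 1 - l).toNat + 1) l r
def pvForest (G : List (Int × Int × Int)) : List (Int × Int × Int) :=
  G.flatMap (fun g => pvNodes g.2.1 g.2.2)
def pvLe3 (a b : Int × Int × Int) : Prop := pvLt3 b a = false

theorem pvLt3_asymm {a b : Int × Int × Int} (h : pvLt3 a b = true) : pvLt3 b a = false := by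
  simp [pvLt3] at *; omega

theorem pvLt3_trans {a b c : Int × Int × Int} (h1 : pvLt3 a b = true) (h2 : pvLt3 b c = true) :
    pvLt3 a c = true := by
  simp [pvLt3] at *; omega

theorem pvLt3_false_eq {a b : Int × Int × Int} (h1 : pvLt3 a b = false) (h2 : pvLt3 b a = false) :
    a = b := by
  obtain ⟨a1, a2, a3⟩ := a; obtain ⟨b1, b2, b3⟩ := b
  simp [pvLt3] at *; omega

theorem pvLt3_le_trans {a b c : Int × Int × Int} (h1 : pvLt3 b a = false) (h2 : pvLt3 c b = false) :
    pvLt3 c a = false := by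
  simp [pvLt3] at *; omega

theorem pvLt3_irrefl (a : Int × Int × Int) : pvLt3 a a = false := by
  simp [pvLt3]

theorem pvLt3_fst_le {a b : Int × Int × Int} (h : pvLt3 a b = false) : b.1 ≤ a.1 := by
  simp [pvLt3] at h; omega

theorem pvLt3_of_fst_lt {a b : Int × Int × Int} (h : a.1 < b.1) : pvLt3 a b = true := by
  simp [pvLt3]; omega

theorem pvInsertBy_perm (x : Int × Int × Int) (ys : List (Int × Int × Int)) :
    (PySem.List.insertBy pvLt3 x ys).Perm (x :: ys) := by
  induction ys with
  | nil => simp [PySem.List.insertBy]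
  | cons y ys ih =>
    simp only [PySem.List.insertBy]
    split
    · exact List.Perm.refl _
    · exact (ih.cons y).trans (List.Perm.swap x y ys)

theorem pvInsertBy_pairwise {x : Int × Int × Int} {ys : List (Int × Int × Int)}
    (h : ys.Pairwise pvLe3) : (PySem.List.insertBy pvLt3 x ys).Pairwise pvLe3 := by
  induction ys with
  | nil => simp [PySem.List.insertBy]
  | cons y ys ih =>
    rw [List.pairwise_cons] at h
    obtain ⟨hy, hys⟩ := h
    simp only [PySem.List.insertBy]
    split
    · rename_i hlt
      refine List.pairwise_cons.2 ⟨?_, List.pairwise_cons.2 ⟨hy, hys⟩⟩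
      intro z hz
      rcases List.mem_cons.1 hz with hz | hz
      · subst hz; exact pvLt3_asymm hlt
      · -- pvLe3 x z : ¬ z < x; from x < y ≤ z
        have hyz := hy z hz
        unfold pvLe3 at *
        by_contra hc
        simp only [Bool.not_eq_false] at hc
        have := pvLt3_trans hc hlt
        rw [hyz] at this; exact Bool.false_ne_true this
    · rename_i hnlt
      refine List.pairwise_cons.2 ⟨?_, ih hys⟩
      intro z hz
      rw [PySem.List.mem_insertBy] at hz
      rcases hz with hz | hz
      · subst hz
        unfold pvLe3
        simpa using hnlt
      · exact hy z hz

theorem pvSortK_aux_perm (xs : List (Int × Int × Int)) : ∀ acc,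
    (xs.foldl (fun acc x => PySem.List.insertBy pvLt3 x acc) acc).Perm (acc ++ xs) := by
  induction xs with
  | nil => intro acc; simp
  | cons x xs ih =>
    intro acc
    simp only [List.foldl_cons]
    refine (ih _).trans ?_
    have h1 : (PySem.List.insertBy pvLt3 x acc ++ xs).Perm ((x :: acc) ++ xs) :=
      (pvInsertBy_perm x acc).append_right xs
    refine h1.trans ?_
    simp only [List.cons_append]
    exact List.perm_middle.symm

theorem pvSortK_perm (xs : List (Int × Int × Int)) : (pvSortK xs).Perm xs := by
  simpa using pvSortK_aux_perm xs []

theorem pvSortK_aux_pairwise (xs : List (Int × Int × Int)) : ∀ acc, acc.Pairwise pvLe3 →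
    (xs.foldl (fun acc x => PySem.List.insertBy pvLt3 x acc) acc).Pairwise pvLe3 := by
  induction xs with
  | nil => intro acc h; simpa
  | cons x xs ih =>
    intro acc h
    exact ih _ (pvInsertBy_pairwise h)

theorem pvSortK_pairwise (xs : List (Int × Int × Int)) : (pvSortK xs).Pairwise pvLe3 := by
  exact pvSortK_aux_pairwise xs [] (by simp)

theorem pvSortK_eq_cons {m : Int × Int × Int} {xs ys : List (Int × Int × Int)}
    (hperm : xs.Perm (m :: ys)) (hmin : ∀ y ∈ ys, pvLt3 m y = true) :
    pvSortK xs = m :: pvSortK ys := by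
  have hanti : ∀ (a b : Int × Int × Int), a ∈ pvSortK xs → b ∈ m :: pvSortK ys →
      pvLe3 a b → pvLe3 b a → a = b := by
    intro a b _ _ h1 h2
    exact pvLt3_false_eq h2 h1
  refine List.Perm.eq_of_pairwise hanti (pvSortK_pairwise xs) ?_ ?_
  · refine List.pairwise_cons.2 ⟨?_, pvSortK_pairwise ys⟩
    intro z hz
    have hz' : z ∈ ys := (pvSortK_perm ys).mem_iff.1 hz
    exact pvLt3_asymm (hmin z hz')
  · exact (pvSortK_perm xs).trans (hperm.trans ((pvSortK_perm ys).symm.cons m))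

theorem pvMid {l r : Int} (h : 1 ≤ r - 1 - l) :
    l < PySem.Int.floordiv (r + l) 2 ∧ PySem.Int.floordiv (r + l) 2 < r := by
  rw [PySem.Int.floordiv_eq_ediv_of_pos (by norm_num)]; omega

theorem pvCollect_fuel : ∀ (k : Nat), ∀ (f g : Nat) (l r : Int), (r - 1 - l).toNat ≤ k →
    (r - 1 - l).toNat < f → (r - 1 - l).toNat < g → pvCollect f l r = pvCollect g l r := by
  intro k
  induction k with
  | zero =>
    intro f g l r hk hf hg
    obtain ⟨f', rfl⟩ : ∃ f', f = f' + 1 := ⟨f - 1, by omega⟩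
    obtain ⟨g', rfl⟩ : ∃ g', g = g' + 1 := ⟨g - 1, by omega⟩
    have : r - 1 - l ≤ 0 := by omega
    simp [pvCollect, this]
  | succ k ih =>
    intro f g l r hk hf hg
    obtain ⟨f', rfl⟩ : ∃ f', f = f' + 1 := ⟨f - 1, by omega⟩
    obtain ⟨g', rfl⟩ : ∃ g', g = g' + 1 := ⟨g - 1, by omega⟩
    by_cases h : r - 1 - l ≤ 0
    · simp [pvCollect, h]
    · have h1 : 1 ≤ r - 1 - l := by omega
      obtain ⟨hls, hsr⟩ := pvMid h1
      simp only [pvCollect, if_neg h]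
      have hL : (PySem.Int.floordiv (r + l) 2 - 1 - l).toNat ≤ k := by omega
      have hR : (r - 1 - PySem.Int.floordiv (r + l) 2).toNat ≤ k := by omega
      rw [ih f' g' l _ hL (by omega) (by omega), ih f' g' _ r hR (by omega) (by omega)]

theorem pvCollect_eq_nodes {f : Nat} {l r : Int} (hf : (r - 1 - l).toNat < f) :
    pvCollect f l r = pvNodes l r :=
  pvCollect_fuel (r - 1 - l).toNat f ((r - 1 - l).toNat + 1) l r le_rfl hf (by omega)

theorem pvNodes_eq_nil {l r : Int} (h : r - 1 - l ≤ 0) : pvNodes l r = [] := by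
  simp [pvNodes, pvCollect, h]

theorem pvNodes_eq_cons {l r : Int} (h : 1 ≤ r - 1 - l) :
    pvNodes l r = (-(r - 1 - l), l, r) ::
      (pvNodes l (PySem.Int.floordiv (r + l) 2) ++ pvNodes (PySem.Int.floordiv (r + l) 2) r) := by
  obtain ⟨hls, hsr⟩ := pvMid h
  have e1 : pvCollect (r - 1 - l).toNat l (PySem.Int.floordiv (r + l) 2)
      = pvNodes l (PySem.Int.floordiv (r + l) 2) := pvCollect_eq_nodes (by omega)
  have e2 : pvCollect (r - 1 - l).toNat (PySem.Int.floordiv (r + l) 2) r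
      = pvNodes (PySem.Int.floordiv (r + l) 2) r := pvCollect_eq_nodes (by omega)
  conv_lhs => rw [pvNodes]
  simp only [pvCollect, if_neg (by omega : ¬ r - 1 - l ≤ 0)]
  rw [e1, e2]

theorem pvNodes_mem : ∀ (k : Nat) (l r : Int), (r - 1 - l).toNat ≤ k →
    ∀ x ∈ pvNodes l r, pvWfG x ∧ 1 ≤ x.2.2 - 1 - x.2.1 ∧ l ≤ x.2.1 ∧ x.2.2 ≤ r ∧
      x.2.2 - 1 - x.2.1 ≤ r - 1 - l := by
  intro k
  induction k with
  | zero =>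
    intro l r hk x hx
    rw [pvNodes_eq_nil (by omega)] at hx
    simp at hx
  | succ k ih =>
    intro l r hk x hx
    by_cases h : r - 1 - l ≤ 0
    · rw [pvNodes_eq_nil h] at hx; simp at hx
    · have h1 : 1 ≤ r - 1 - l := by omega
      obtain ⟨hls, hsr⟩ := pvMid h1
      rw [pvNodes_eq_cons h1] at hx
      rcases List.mem_cons.1 hx with hx | hx
      · subst hx
        refine ⟨by simp [pvWfG], by simp; omega, by simp, by simp, by simp⟩
      · rcases List.mem_append.1 hx with hx | hx
        · obtain ⟨h1, h2, h3, h4, h5⟩ := ih l _ (by omega) x hx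
          exact ⟨h1, h2, by omega, by omega, by omega⟩
        · obtain ⟨h1, h2, h3, h4, h5⟩ := ih _ r (by omega) x hx
          exact ⟨h1, h2, by omega, by omega, by omega⟩

theorem pvNodes_length : ∀ (k : Nat) (l r : Int), (r - 1 - l).toNat ≤ k →
    (pvNodes l r).length = (r - 1 - l).toNat := by
  intro k
  induction k with
  | zero =>
    intro l r hk
    rw [pvNodes_eq_nil (by omega)]; simp; omega
  | succ k ih =>
    intro l r hk
    by_cases h : r - 1 - l ≤ 0
    · rw [pvNodes_eq_nil h]; simp; omega
    · have h1 : 1 ≤ r - 1 - l := by omega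
      obtain ⟨hls, hsr⟩ := pvMid h1
      rw [pvNodes_eq_cons h1]
      simp only [List.length_cons, List.length_append]
      rw [ih l _ (by omega), ih _ r (by omega)]
      omega

theorem pvRemoveFirst_sublist (k : Int × Int × Int) (G : List (Int × Int × Int)) :
    (pvRemoveFirst k G).Sublist G := by
  induction G with
  | nil => simp [pvRemoveFirst]
  | cons x xs ih =>
    simp only [pvRemoveFirst]
    split
    · exact List.sublist_cons_self x xs
    · exact ih.cons₂ x

theorem pvRemoveFirst_perm {k : Int × Int × Int} {G : List (Int × Int × Int)} (h : k ∈ G) :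
    G.Perm (k :: pvRemoveFirst k G) := by
  induction G with
  | nil => simp at h
  | cons x xs ih =>
    by_cases hx : x = k
    · subst hx; simp [pvRemoveFirst]
    · have hk : k ∈ xs := by
        rcases List.mem_cons.1 h with h | h
        · exact absurd h.symm hx
        · exact h
      simp only [pvRemoveFirst, if_neg hx]
      exact ((ih hk).cons x).trans (List.Perm.swap k x _)

theorem pvRemoveFirst_sep {k : Int × Int × Int} {G : List (Int × Int × Int)}
    (hp : G.Pairwise pvSep) (hk : k ∈ G) : ∀ h ∈ pvRemoveFirst k G, pvSep k h := by
  induction G with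
  | nil => simp [pvRemoveFirst]
  | cons x xs ih =>
    rw [List.pairwise_cons] at hp
    obtain ⟨hx, hxs⟩ := hp
    intro h hh
    by_cases hxk : x = k
    · subst hxk
      simp only [pvRemoveFirst] at hh
      exact hx h hh
    · simp only [pvRemoveFirst, if_neg hxk] at hh
      have hkxs : k ∈ xs := by
        rcases List.mem_cons.1 hk with h' | h'
        · exact absurd h'.symm hxk
        · exact h'
      rcases List.mem_cons.1 hh with hh | hh
      · subst hh
        have := hx k hkxs
        unfold pvSep at *
        tauto
      · exact ih hxs hkxs h hh

theorem pvFindMin_fold_mem (xs : List (Int × Int × Int)) : ∀ a,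
    xs.foldl (fun m y => if pvLt3 y m then y else m) a = a ∨
    xs.foldl (fun m y => if pvLt3 y m then y else m) a ∈ xs := by
  induction xs with
  | nil => intro a; simp
  | cons y ys ih =>
    intro a
    simp only [List.foldl_cons]
    rcases ih (if pvLt3 y a then y else a) with h | h
    · rw [h]
      split
      · right; simp
      · left; rfl
    · right; exact List.mem_cons_of_mem y h

theorem pvFindMin_fold_min (xs : List (Int × Int × Int)) : ∀ a x, (x = a ∨ x ∈ xs) →
    pvLt3 x (xs.foldl (fun m y => if pvLt3 y m then y else m) a) = false := by
  induction xs with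
  | nil =>
    intro a x hx
    rcases hx with rfl | hx
    · simp [pvLt3]
    · simp at hx
  | cons y ys ih =>
    intro a x hx
    simp only [List.foldl_cons]
    set a' := if pvLt3 y a then y else a with ha'
    have hya' : pvLt3 y a' = false ∧ pvLt3 a a' = false := by
      rw [ha']
      split
      · rename_i hlt
        constructor
        · simp [pvLt3]
        · exact pvLt3_asymm hlt
      · rename_i hnlt
        constructor
        · simpa using hnlt
        · simp [pvLt3]
    have hrec := ih a'
    have hres : pvLt3 a' (ys.foldl (fun m y => if pvLt3 y m then y else m) a') = false :=
      hrec a' (Or.inl rfl)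
    rcases hx with rfl | hx
    · exact pvLt3_le_trans hres hya'.2
    · rcases List.mem_cons.1 hx with rfl | hx
      · exact pvLt3_le_trans hres hya'.1
      · exact hrec x (Or.inr hx)

theorem pvFindMin_spec {G : List (Int × Int × Int)} {m : Int × Int × Int}
    (h : pvFindMin G = some m) : m ∈ G ∧ ∀ x ∈ G, pvLt3 x m = false := by
  cases G with
  | nil => simp [pvFindMin] at h
  | cons x xs =>
    simp only [pvFindMin, Option.some.injEq] at h
    subst h
    constructor
    · rcases pvFindMin_fold_mem xs x with h | h
      · rw [h]; simp
      · exact List.mem_cons_of_mem x h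
    · intro y hy
      rcases List.mem_cons.1 hy with h | h
      · exact pvFindMin_fold_min xs x y (Or.inl h)
      · exact pvFindMin_fold_min xs x y (Or.inr h)

theorem pvMain : ∀ (k : Nat) (G : List (Int × Int × Int)), pvInv G → (pvForest G).length = k →
    pvPopLoop k G = (pvSortK (pvForest G)).map (fun g => PySem.Int.floordiv (g.2.2 + g.2.1) 2) := by
  intro k
  induction k with
  | zero =>
    intro G _ hlen
    have hnil : pvForest G = [] := List.eq_nil_of_length_eq_zero hlen
    rw [hnil]
    simp [pvPopLoop, pvSortK]
  | succ k ih =>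
    intro G hinv hlen
    obtain ⟨hwf, hsep⟩ := hinv
    have hG : G ≠ [] := by
      intro h; rw [h] at hlen; simp [pvForest] at hlen
    obtain ⟨m, hfm⟩ : ∃ m, pvFindMin G = some m := by
      cases G with
      | nil => exact absurd rfl hG
      | cons q qs => exact ⟨_, rfl⟩
    obtain ⟨hmG, hmin⟩ := pvFindMin_spec hfm
    obtain ⟨m1, ml, mr⟩ := m
    have hmwf : m1 = -(mr - 1 - ml) := hwf _ hmG
    -- some member of G has a positive-size gap, hence so does the popped minimum
    have hms : 1 ≤ mr - 1 - ml := by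
      have hne : pvForest G ≠ [] := by intro h; rw [h] at hlen; simp at hlen
      obtain ⟨x, hx⟩ := List.exists_mem_of_ne_nil _ hne
      rw [pvForest, List.mem_flatMap] at hx
      obtain ⟨g, hgG, hxg⟩ := hx
      have hg1pos : 1 ≤ g.2.2 - 1 - g.2.1 := by
        by_contra hc
        rw [pvNodes_eq_nil (by omega)] at hxg
        simp at hxg
      have hg1wf := hwf g hgG
      have h1 : (m1, ml, mr).1 ≤ g.1 := pvLt3_fst_le (hmin g hgG)
      unfold pvWfG at hg1wf
      simp at h1
      omega
    obtain ⟨hls, hsr⟩ := pvMid hms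
    -- names for the pieces
    set s := PySem.Int.floordiv (mr + ml) 2 with hs
    set rest := pvRemoveFirst (m1, ml, mr) G with hrest
    set G' := ((-(s - 1 - ml), ml, s) :: (-(mr - 1 - s), s, mr) :: rest :
      List (Int × Int × Int)) with hG'
    have hstep : pvPopLoop (k+1) G = s :: pvPopLoop k G' := by
      simp only [pvPopLoop, hfm]
      rfl
    have hsepm : ∀ h ∈ rest, pvSep (m1, ml, mr) h := pvRemoveFirst_sep hsep hmG
    have hrest_sub : rest.Sublist G := pvRemoveFirst_sublist _ G
    -- G' satisfies the invariant
    have hinv' : pvInv G' := by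
      constructor
      · intro g hg
        rcases List.mem_cons.1 hg with rfl | hg
        · unfold pvWfG; rfl
        · rcases List.mem_cons.1 hg with rfl | hg
          · unfold pvWfG; rfl
          · exact hwf g (hrest_sub.subset hg)
      · refine List.pairwise_cons.2 ⟨?_, List.pairwise_cons.2 ⟨?_, hsep.sublist hrest_sub⟩⟩
        · intro h hh
          rcases List.mem_cons.1 hh with rfl | hh
          · exact Or.inl le_rfl
          · rcases hsepm h hh with hcase | hcase
            · exact Or.inl (by simp at hcase ⊢; omega)
            · exact Or.inr (by simp at hcase ⊢; omega)
        · intro h hh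
          rcases hsepm h hh with hcase | hcase
          · exact Or.inl (by simp at hcase ⊢; omega)
          · exact Or.inr (by simp at hcase ⊢; omega)
    -- the forest of G is (m :: forest of G') up to permutation
    have hGperm : G.Perm ((m1, ml, mr) :: rest) := pvRemoveFirst_perm hmG
    have hforest : (pvForest G).Perm ((m1, ml, mr) :: pvForest G') := by
      have h1 : (pvForest G).Perm (pvForest ((m1, ml, mr) :: rest)) := hGperm.flatMap (fun a _ => List.Perm.refl _)
      refine h1.trans (List.Perm.of_eq ?_)
      have hnodes : pvNodes ml mr = (-(mr - 1 - ml), ml, mr) :: (pvNodes ml s ++ pvNodes s mr) :=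
        pvNodes_eq_cons hms
      simp only [pvForest, List.flatMap_cons]
      rw [hnodes, ← hmwf]
      simp [hG', List.flatMap_cons, List.append_assoc]
    -- m is strictly below every node of the forest of G'
    have hstrict : ∀ y ∈ pvForest G', pvLt3 (m1, ml, mr) y = true := by
      intro y hy
      rw [pvForest, List.mem_flatMap] at hy
      obtain ⟨h, hgG', hyh⟩ := hy
      rcases List.mem_cons.1 hgG' with rfl | hgG'
      · obtain ⟨hwfy, hszy, hly, hry, hsz⟩ :=
          pvNodes_mem (s - 1 - ml).toNat ml s le_rfl y hyh
        apply pvLt3_of_fst_lt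
        unfold pvWfG at hwfy
        simp; omega
      rcases List.mem_cons.1 hgG' with rfl | hhrest
      · obtain ⟨hwfy, hszy, hly, hry, hsz⟩ :=
          pvNodes_mem (mr - 1 - s).toNat s mr le_rfl y hyh
        apply pvLt3_of_fst_lt
        unfold pvWfG at hwfy
        simp; omega
      · have hhG : h ∈ G := hrest_sub.subset hhrest
        have hwfh := hwf h hhG
        have hle_hm : pvLt3 h (m1, ml, mr) = false := hmin h hhG
        obtain ⟨hwfy, hszy, hly, hry, hsz⟩ :=
          pvNodes_mem (h.2.2 - 1 - h.2.1).toNat h.2.1 h.2.2 le_rfl y hyh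
        -- h ≤lex y : y is h itself or a strictly smaller (hence lex-greater) node
        have hyh_le : pvLt3 y h = false := by
          have hszh : 1 ≤ h.2.2 - 1 - h.2.1 := by omega
          rw [pvNodes_eq_cons hszh] at hyh
          rcases List.mem_cons.1 hyh with rfl | hyh
          · rw [show (-(h.2.2 - 1 - h.2.1), h.2.1, h.2.2) = h from ?_]
            · exact pvLt3_irrefl h
            · unfold pvWfG at hwfh
              exact Prod.ext hwfh.symm rfl
          · obtain ⟨hm1, hm2⟩ := pvMid hszh
            have hlt : pvLt3 h y = true := by
              apply pvLt3_of_fst_lt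
              unfold pvWfG at hwfh hwfy
              rcases List.mem_append.1 hyh with hyh | hyh
              · obtain ⟨_, _, _, hb, hc⟩ :=
                  pvNodes_mem (PySem.Int.floordiv (h.2.2 + h.2.1) 2 - 1 - h.2.1).toNat
                    h.2.1 (PySem.Int.floordiv (h.2.2 + h.2.1) 2) le_rfl y hyh
                omega
              · obtain ⟨_, _, ha, _, hc⟩ :=
                  pvNodes_mem (h.2.2 - 1 - PySem.Int.floordiv (h.2.2 + h.2.1) 2).toNat
                    (PySem.Int.floordiv (h.2.2 + h.2.1) 2) h.2.2 le_rfl y hyh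
                omega
            exact pvLt3_asymm hlt
        have hym : pvLt3 y (m1, ml, mr) = false := pvLt3_le_trans hle_hm hyh_le
        by_cases hmy : pvLt3 (m1, ml, mr) y = true
        · exact hmy
        · exfalso
          rw [Bool.not_eq_true] at hmy
          have heq := pvLt3_false_eq hmy hym
          obtain ⟨y1, yl, yr⟩ := y
          rcases hsepm h hhrest with hcase | hcase <;>
            (simp only [Prod.mk.injEq] at heq; simp at hcase hly hry hszy; omega)
    -- pull the minimum out of the sort and recurse
    have hlen' : (pvForest G').length = k := by
      have := hforest.length_eq
      rw [hlen] at this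
      simpa using this.symm
    have hsort : pvSortK (pvForest G) = (m1, ml, mr) :: pvSortK (pvForest G') :=
      pvSortK_eq_cons hforest hstrict
    rw [hstep, ih G' hinv' hlen', hsort]
    simp only [List.map_cons]
    rfl

-- ===== VERDICT (by name: the statement is the Claim_ definition above) =====
theorem heapSeatingGenerator_spec : Claim_equal_heapSeatingGenerator := by
  intro n _
  unfold Spec_heapSeatingGenerator heapSeatingGenerator heapSeatingGenerator_alt
  have hforest : pvForest [(-n, -1, n)] = pvNodes (-1) n := by simp [pvForest]
  have hlen : (pvForest [(-n, -1, n)]).length = n.toNat := by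
    rw [hforest, pvNodes_length (n - 1 - (-1)).toNat (-1) n le_rfl]
    omega
  have hinv : pvInv [(-n, -1, n)] := by
    constructor
    · intro g hg
      simp only [List.mem_singleton] at hg
      subst hg
      unfold pvWfG
      simp
    · simp
  rw [pvMain n.toNat [(-n, -1, n)] hinv hlen, hforest,
      pvCollect_eq_nodes (by omega : (n - 1 - (-1)).toNat < n.toNat + 1)]
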